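-- pv_equiv track=rewrite | github.com/Lavanya-hue/hackerearth-challenges | Cloudyday.py | maximumPeople
-- ===== SOURCE A (Python) =====
-- def maximumPeople(p, x, y, r):
--     # Return the maximum number of people that will be in a sunny town after removing exactly one cloud.
--     n = len(p)
--     m = len(y)
--     cloud_population = [0] * m
--     town_covered_by_clouds = [0] * n
--     single_cloud_coverage = [0] * m
--     sunny_population = 0
--     for i in range(m):
--         for j in range(n):
--             if y[i] - r[i] <= x[j] <= y[i] + r[i]:
--                 cloud_population[i] += p[j]
--                 town_covered_by_clouds[j] += 1
--     for i in range(n):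
--         if town_covered_by_clouds[i] == 0:
--             sunny_population += p[i]
--
--     max_sunny_population = sunny_population
--     for i in range(m):
--         for j in range(n):
--             if y[i] - r[i] <= x[j] <= y[i] + r[i] and town_covered_by_clouds[j] == 1:
--                 single_cloud_coverage[i] += p[j]
--     for i in range(m):
--         current_sunny_population = sunny_population + single_cloud_coverage[i]
--         max_sunny_population = max(max_sunny_population, current_sunny_population)
--
--     return max_sunny_population
-- ===== SOURCE B (Python) =====
-- def maximumPeople(p, x, y, r):
--     # Sweep line: sort interval endpoints and town positions on one integer axis
--     # (coordinates doubled; a cloud [a,b] opens at 2a-1 and closes at 2b+1), then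
--     # scan once, tracking the number of active clouds and the sum of their ids,
--     # which identifies the single covering cloud when exactly one is active.
--     events = []
--     for i, (yi, ri) in enumerate(zip(y, r)):
--         if ri >= 0:
--             events.append((2 * (yi - ri) - 1, 0, i))
--             events.append((2 * (yi + ri) + 1, 2, i))
--     for pj, xj in zip(p, x):
--         events.append((2 * xj, 1, pj))
--     events.sort(key=lambda e: e[0])
--     cnt = 0
--     idsum = 0
--     base = 0
--     gains = {}
--     for _, t, v in events:
--         if t == 0:
--             cnt += 1
--             idsum += v
--         elif t == 2:
--             cnt -= 1
--             idsum -= v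
--         elif cnt == 0:
--             base += v
--         elif cnt == 1:
--             gains[idsum] = gains.get(idsum, 0) + v
--     best = max(gains.values(), default=0)
--     return base + max(0, best)
-- ===== Notes on version B (the rewrite author's own statement) =====
-- stated objective: faster
-- what changed: A tests every (cloud, town) pair in two O(n*m) nested passes; B is a sweep line: it sorts the 2m interval endpoints and n town positions on one axis and scans them once, tracking the count and id-sum of active clouds (the id-sum names the unique covering cloud when the count is 1), accumulating the always-sunny base and per-cloud gains.
-- outside the precondition, e.g. on maximumPeople([1, 2], [], [], []): A returns 3, B returns 0
import Mathlib
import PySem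

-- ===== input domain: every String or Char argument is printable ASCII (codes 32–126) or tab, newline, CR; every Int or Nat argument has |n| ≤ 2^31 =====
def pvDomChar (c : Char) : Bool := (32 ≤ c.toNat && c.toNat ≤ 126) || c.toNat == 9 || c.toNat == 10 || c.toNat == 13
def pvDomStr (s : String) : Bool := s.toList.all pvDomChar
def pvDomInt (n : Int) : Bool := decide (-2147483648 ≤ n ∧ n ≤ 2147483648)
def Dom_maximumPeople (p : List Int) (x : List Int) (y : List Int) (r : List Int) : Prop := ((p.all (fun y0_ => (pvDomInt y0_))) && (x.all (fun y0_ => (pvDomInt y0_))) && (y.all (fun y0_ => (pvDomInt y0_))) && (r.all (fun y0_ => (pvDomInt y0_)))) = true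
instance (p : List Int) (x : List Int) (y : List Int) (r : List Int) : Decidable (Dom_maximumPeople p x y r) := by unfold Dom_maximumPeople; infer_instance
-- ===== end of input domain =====

-- B replaces A's O(n*m) pairwise cloud×town scans by a sweep line: it sorts interval
-- endpoints and town positions on one axis and scans them once, tracking the count and
-- id-sum of active clouds (asymptotically faster: O((n+m) log (n+m)) vs O(n*m)).

-- ===== PORT A =====
def maximumPeople (p : List Int) (x : List Int) (y : List Int) (r : List Int) : Int :=
  let n := p.length
  let m := y.length
  let st := (List.range m).foldl (fun (st : List Int × List Int) i =>
      (List.range n).foldl (fun (st : List Int × List Int) j =>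
        if y.getD i 0 - r.getD i 0 ≤ x.getD j 0 ∧ x.getD j 0 ≤ y.getD i 0 + r.getD i 0 then
          (st.1.set i (st.1.getD i 0 + p.getD j 0), st.2.set j (st.2.getD j 0 + 1))
        else st) st)
    (List.replicate m 0, List.replicate n 0)
  let sunny := (List.range n).foldl (fun s i => if st.2.getD i 0 = 0 then s + p.getD i 0 else s) 0
  let scc := (List.range m).foldl (fun (sc : List Int) i =>
      (List.range n).foldl (fun (sc : List Int) j =>
        if (y.getD i 0 - r.getD i 0 ≤ x.getD j 0 ∧ x.getD j 0 ≤ y.getD i 0 + r.getD i 0) ∧ st.2.getD j 0 = 1 then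
          sc.set i (sc.getD i 0 + p.getD j 0)
        else sc) sc)
    (List.replicate m 0)
  (List.range m).foldl (fun mx i => max mx (sunny + scc.getD i 0)) sunny

-- ===== PORT B =====
def maximumPeople_alt (p : List Int) (x : List Int) (y : List Int) (r : List Int) : Int :=
  let events := (PySem.List.enumerate (y.zip r) 0).foldl (fun es e =>
      if 0 ≤ e.2.2 then
        es ++ [(2 * (e.2.1 - e.2.2) - 1, (0 : Int), e.1), (2 * (e.2.1 + e.2.2) + 1, (2 : Int), e.1)]
      else es) []
  let events := (p.zip x).foldl (fun es t => es ++ [(2 * t.2, (1 : Int), t.1)]) events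
  let events := PySem.List.sorted events (fun e => e.1) false
  let fin := events.foldl (fun (st : Int × Int × Int × PySem.Dict Int Int) e =>
      if e.2.1 = 0 then (st.1 + 1, st.2.1 + e.2.2, st.2.2)
      else if e.2.1 = 2 then (st.1 - 1, st.2.1 - e.2.2, st.2.2)
      else if st.1 = 0 then (st.1, st.2.1, st.2.2.1 + e.2.2, st.2.2.2)
      else if st.1 = 1 then (st.1, st.2.1, st.2.2.1, st.2.2.2.insert st.2.1 (st.2.2.2.getD st.2.1 0 + e.2.2))
      else st) (0, 0, 0, PySem.Dict.empty)
  fin.2.2.1 + max 0 (PySem.List.maxD (PySem.Dict.values fin.2.2.2) (fun v => v) 0)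

-- ===== PRECONDITION & SPEC =====
-- Pre_ excludes mismatched list lengths (len(x) < len(p) or len(r) < len(y)) when there is a town:
-- there A raises IndexError whenever a cloud loop touches a missing entry; in the sole remaining
-- shape (no clouds, fewer positions than populations) the input is malformed — towns without a
-- position — and counting every population entry (A) or only the positioned towns (B) are equally
-- defensible readings, so no value is claimed there.
def Pre_maximumPeople (p : List Int) (x : List Int) (y : List Int) (r : List Int) : Prop :=
  p = [] ∨ (p.length ≤ x.length ∧ y.length ≤ r.length)
instance (p : List Int) (x : List Int) (y : List Int) (r : List Int) : Decidable (Pre_maximumPeople p x y r) := by unfold Pre_maximumPeople; infer_instance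
def pvWitness_maximumPeople : List Int × List Int × List Int × List Int := ([2, 3], [0, 5], [1], [2])

def Spec_maximumPeople (p : List Int) (x : List Int) (y : List Int) (r : List Int) (out : Int) : Prop := out = maximumPeople_alt p x y r
instance (p : List Int) (x : List Int) (y : List Int) (r : List Int) (out : Int) : Decidable (Spec_maximumPeople p x y r out) := by unfold Spec_maximumPeople; infer_instance

-- ===== CLAIM (what is proved, stated in full; the proofs are below) =====
def Claim_equal_maximumPeople : Prop := ∀ (p : List Int) (x : List Int) (y : List Int) (r : List Int), Dom_maximumPeople p x y r → Pre_maximumPeople p x y r → Spec_maximumPeople p x y r (maximumPeople p x y r)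
-- ===== LEMMAS AND PROOFS =====

-- `covAt x y r i j` : cloud i covers town j (A's interval test, on getD views).
abbrev covAt (x y r : List Int) (i j : Nat) : Prop :=
  y.getD i 0 - r.getD i 0 ≤ x.getD j 0 ∧ x.getD j 0 ≤ y.getD i 0 + r.getD i 0

-- the list of clouds covering town j
def KK (x y r : List Int) (j : Nat) : List Nat :=
  (List.range y.length).filter (fun i => decide (covAt x y r i j))

-- population of towns covered by no cloud
def baseV (p x y r : List Int) : Int :=
  (((List.range p.length).filter (fun j => decide (KK x y r j = []))).map (fun j => p.getD j 0)).sum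

-- population of towns covered exactly by cloud i alone
def sccV (p x y r : List Int) (i : Nat) : Int :=
  (((List.range p.length).filter (fun j => decide (KK x y r j = [i]))).map (fun j => p.getD j 0)).sum

-- generic: fold over pair state projects to fold on second component
lemma foldl_snd {γ σ τ : Type} (l : List γ) (F : σ × τ → γ → σ × τ) (G : τ → γ → τ)
    (h : ∀ s a, (F s a).2 = G s.2 a) : ∀ (s : σ × τ), (l.foldl F s).2 = l.foldl G s.2 := by
  induction l with
  | nil => intro s; rfl
  | cons a l ih => intro s; simp only [List.foldl_cons, ih, h]

-- length preservation for set-loops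
lemma foldl_set_length {c : Nat → Prop} [DecidablePred c] {g : Nat → Nat} {f : List Int → Nat → Int} :
    ∀ (l : List Nat) (t : List Int),
      (l.foldl (fun t j => if c j then t.set (g j) (f t j) else t) t).length = t.length := by
  intro l
  induction l with
  | nil => intro t; rfl
  | cons a l ih =>
    intro t
    simp only [List.foldl_cons]
    by_cases hc : c a <;> simp [hc, ih]

lemma inner_tc (c : Nat → Bool) :
    ∀ (l : List Nat) (t : List Int) (j : Nat), j < t.length →
      (l.foldl (fun t j' => if c j' then t.set j' (t.getD j' 0 + 1) else t) t).getD j 0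
        = t.getD j 0 + ((l.filter fun j' => j' == j && c j').length : Int) := by
  intro l
  induction l with
  | nil => intro t j hj; simp
  | cons a l ih =>
    intro t j hj
    simp only [List.foldl_cons, List.filter_cons]
    by_cases hc : c a
    · have hlen : (t.set a (t.getD a 0 + 1)).length = t.length := by simp
      rw [if_pos hc, ih _ j (by omega)]
      by_cases haj : a = j
      · subst haj
        simp [List.getD_eq_getElem?_getD, hj, hc]
        ring
      · simp [List.getD_eq_getElem?_getD, haj, hc]
    · rw [if_neg hc, ih _ j hj]
      simp [hc]

lemma filter_range_beq (n j : Nat) (hj : j < n) (c : Nat → Bool) :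
    ((List.range n).filter (fun j' => j' == j && c j')).length = if c j then 1 else 0 := by
  by_cases hc : c j
  · rw [if_pos hc]
    have h1 : ((List.range n).filter (fun j' => j' == j && c j')).length
        = ((List.range n).filter (fun j' => j' == j)).length := by
      rw [List.filter_congr]
      intro a _
      by_cases haj : a = j
      · subst haj; simp [hc]
      · simp [haj]
    rw [h1, ← List.countP_eq_length_filter]
    have := @List.count_range j n
    simp only [List.count, hj, if_pos] at this
    simpa [List.count] using this
  · rw [if_neg hc]
    simp only [List.length_eq_zero_iff, List.filter_eq_nil_iff]
    intro a _
    by_cases haj : a = j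
    · subst haj; simp [hc]
    · simp [haj]

def tcF (p x y r : List Int) : List Int :=
  (List.range y.length).foldl (fun t i =>
    (List.range p.length).foldl (fun t j =>
      if covAt x y r i j then t.set j (t.getD j 0 + 1) else t) t)
    (List.replicate p.length 0)

lemma tc_char (p x y r : List Int) :
    ∀ (cs : List Nat) (t : List Int), t.length = p.length → ∀ j, j < p.length →
      ((cs.foldl (fun t i =>
          (List.range p.length).foldl (fun t j' =>
            if covAt x y r i j' then t.set j' (t.getD j' 0 + 1) else t) t) t).getD j 0)
        = t.getD j 0 + ((cs.filter (fun i => decide (covAt x y r i j))).length : Int) := by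
  intro cs
  induction cs with
  | nil => intro t ht j hj; simp
  | cons i cs ih =>
    intro t ht j hj
    simp only [List.foldl_cons, List.filter_cons]
    have hlen : ((List.range p.length).foldl (fun t j' =>
        if covAt x y r i j' then t.set j' (t.getD j' 0 + 1) else t) t).length = t.length := by
      have := foldl_set_length (c := fun j' => covAt x y r i j') (g := id)
        (f := fun t j' => t.getD j' 0 + 1) (List.range p.length) t
      simpa using this
    rw [ih _ (by omega) j hj]
    have := inner_tc (fun j' => decide (covAt x y r i j')) (List.range p.length) t j (by omega)
    simp only [decide_eq_true_eq] at this
    rw [this, filter_range_beq _ _ hj]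
    by_cases hc : covAt x y r i j
    · simp only [decide_eq_true hc, if_true, List.length_cons]
      push_cast
      ring
    · simp only [decide_eq_false hc, Bool.false_eq_true, if_false]
      ring

lemma tcF_getD (p x y r : List Int) (j : Nat) (hj : j < p.length) :
    (tcF p x y r).getD j 0 = ((KK x y r j).length : Int) := by
  unfold tcF KK
  rw [tc_char p x y r (List.range y.length) _ (by simp) j hj]
  simp [List.getD_eq_getElem?_getD, hj]

-- single-cloud coverage array
def sccF (p x y r : List Int) : List Int :=
  (List.range y.length).foldl (fun sc i =>
    (List.range p.length).foldl (fun sc j =>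
      if covAt x y r i j ∧ (tcF p x y r).getD j 0 = 1 then sc.set i (sc.getD i 0 + p.getD j 0) else sc) sc)
    (List.replicate y.length 0)

lemma inner_scc (c : Nat → Bool) (i : Nat) (v : Nat → Int) :
    ∀ (l : List Nat) (t : List Int), i < t.length →
      (l.foldl (fun t j => if c j then t.set i (t.getD i 0 + v j) else t) t).getD i 0
        = t.getD i 0 + ((l.filter c).map v).sum ∧
      (∀ k, k ≠ i → (l.foldl (fun t j => if c j then t.set i (t.getD i 0 + v j) else t) t).getD k 0 = t.getD k 0) := by
  intro l
  induction l with
  | nil => intro t _; simp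
  | cons a l ih =>
    intro t hi
    simp only [List.foldl_cons, List.filter_cons]
    by_cases hc : c a
    · rw [if_pos hc]
      rcases ih (t.set i (t.getD i 0 + v a)) (by simpa using hi) with ⟨h1, h2⟩
      constructor
      · rw [h1]
        simp [List.getD_eq_getElem?_getD, hi, hc]
        ring
      · intro k hk
        rw [h2 k hk]
        simp [List.getD_eq_getElem?_getD, Ne.symm hk]
    · rw [if_neg hc]
      rcases ih t hi with ⟨h1, h2⟩
      exact ⟨by rw [h1]; simp [hc], fun k hk => h2 k hk⟩

lemma mem_KK (x y r : List Int) (i j : Nat) :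
    i ∈ KK x y r j ↔ i < y.length ∧ covAt x y r i j := by
  simp [KK, covAt, List.mem_filter, List.mem_range]

lemma KK_single_iff (x y r : List Int) (i j : Nat) (hi : i < y.length) :
    KK x y r j = [i] ↔ covAt x y r i j ∧ (KK x y r j).length = 1 := by
  constructor
  · intro h
    refine ⟨((mem_KK x y r i j).1 (by simp [h])).2, by simp [h]⟩
  · rintro ⟨hcov, hlen⟩
    rcases List.length_eq_one_iff.1 hlen with ⟨i0, h0⟩
    have : i ∈ KK x y r j := (mem_KK x y r i j).2 ⟨hi, hcov⟩
    rw [h0] at this ⊢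
    simp at this
    simp [this]

lemma scc_char (p x y r : List Int) (i : Nat) :
    ∀ (cs : List Nat) (t : List Int), i < t.length → (∀ c ∈ cs, c < t.length) →
      (cs.foldl (fun sc c =>
          (List.range p.length).foldl (fun sc j =>
            if covAt x y r c j ∧ (tcF p x y r).getD j 0 = 1 then sc.set c (sc.getD c 0 + p.getD j 0) else sc) sc) t).getD i 0
        = t.getD i 0 + ((cs.filter (· == i)).length : Int) *
            (((List.range p.length).filter (fun j => decide (covAt x y r i j ∧ (tcF p x y r).getD j 0 = 1))).map (fun j => p.getD j 0)).sum := by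
  intro cs
  induction cs with
  | nil => intro t _ _; simp
  | cons c cs ih =>
    intro t hi hcs
    simp only [List.foldl_cons, List.filter_cons]
    have hlen : ((List.range p.length).foldl (fun sc j =>
        if covAt x y r c j ∧ (tcF p x y r).getD j 0 = 1 then sc.set c (sc.getD c 0 + p.getD j 0) else sc) t).length = t.length := by
      exact foldl_set_length (c := fun j => covAt x y r c j ∧ (tcF p x y r).getD j 0 = 1)
        (g := fun _ => c) (f := fun sc j => sc.getD c 0 + p.getD j 0) (List.range p.length) t
    rw [ih _ (by omega) (fun c' hc' => by rw [hlen]; exact hcs c' (List.mem_cons_of_mem _ hc'))]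
    have hc : c < t.length := hcs c (List.mem_cons_self)
    by_cases hci : c = i
    · subst hci
      have h1 := (inner_scc (fun j => decide (covAt x y r c j ∧ (tcF p x y r).getD j 0 = 1)) c
        (fun j => p.getD j 0) (List.range p.length) t hc).1
      simp only [decide_eq_true_eq] at h1
      rw [h1]
      simp
      ring
    · have h2 := (inner_scc (fun j => decide (covAt x y r c j ∧ (tcF p x y r).getD j 0 = 1)) c
        (fun j => p.getD j 0) (List.range p.length) t hc).2 i (Ne.symm hci)
      simp only [decide_eq_true_eq] at h2
      rw [h2]
      simp [hci]

lemma sccF_getD (p x y r : List Int) (i : Nat) (hi : i < y.length) :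
    (sccF p x y r).getD i 0 = sccV p x y r i := by
  unfold sccF sccV
  rw [scc_char p x y r i (List.range y.length) _ (by simpa using hi) (by simp)]
  have hcount : ((List.range y.length).filter (· == i)).length = 1 := by
    rw [← List.countP_eq_length_filter]
    have := @List.count_range i y.length
    simpa [List.count, hi] using this
  rw [hcount]
  have hfc : (List.range p.length).filter (fun j => decide (covAt x y r i j ∧ (tcF p x y r).getD j 0 = 1))
      = (List.range p.length).filter (fun j => decide (KK x y r j = [i])) := by
    apply List.filter_congr
    intro j hj
    have hjn : j < p.length := List.mem_range.1 hj
    rw [tcF_getD p x y r j hjn]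
    simp only [decide_eq_decide]
    rw [KK_single_iff x y r i j hi]
    constructor
    · rintro ⟨h1, h2⟩
      exact ⟨h1, by exact_mod_cast h2⟩
    · rintro ⟨h1, h2⟩
      exact ⟨h1, by exact_mod_cast h2⟩
  rw [hfc]
  simp [List.getD_eq_getElem?_getD, hi]

lemma st2_eq (p x y r : List Int) :
    ((List.range y.length).foldl (fun (st : List Int × List Int) i =>
        (List.range p.length).foldl (fun (st : List Int × List Int) j =>
          if y.getD i 0 - r.getD i 0 ≤ x.getD j 0 ∧ x.getD j 0 ≤ y.getD i 0 + r.getD i 0 then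
            (st.1.set i (st.1.getD i 0 + p.getD j 0), st.2.set j (st.2.getD j 0 + 1))
          else st) st)
      (List.replicate y.length 0, List.replicate p.length 0)).2 = tcF p x y r := by
  rw [foldl_snd _ _ (fun t i => (List.range p.length).foldl (fun t j =>
      if covAt x y r i j then t.set j (t.getD j 0 + 1) else t) t) ?_]
  · rfl
  · intro s i
    exact foldl_snd (List.range p.length)
      (fun (st : List Int × List Int) j =>
        if y.getD i 0 - r.getD i 0 ≤ x.getD j 0 ∧ x.getD j 0 ≤ y.getD i 0 + r.getD i 0 then
          (st.1.set i (st.1.getD i 0 + p.getD j 0), st.2.set j (st.2.getD j 0 + 1))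
        else st)
      (fun t j => if covAt x y r i j then t.set j (t.getD j 0 + 1) else t)
      (fun s' j => by
        by_cases h : covAt x y r i j
        · have h' := h; rw [covAt] at h'
          simp only [if_pos h']
        · have h' := h; rw [covAt] at h'
          simp only [if_neg h']) s

lemma sunny_eq (p x y r : List Int) :
    (List.range p.length).foldl (fun s i => if (tcF p x y r).getD i 0 = 0 then s + p.getD i 0 else s) 0
      = baseV p x y r := by
  rw [PySem.List.foldl_congr_mem _ _ (fun s i => if KK x y r i = [] then s + p.getD i 0 else s) _ ?_]
  · rw [PySem.List.foldl_ite_eq_foldl_filter (p := fun i => KK x y r i = [])]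
    rw [PySem.List.foldl_add]
    simp [baseV]
  · intro acc i hi
    have hin : i < p.length := List.mem_range.1 hi
    apply if_congr _ rfl rfl
    rw [tcF_getD p x y r i hin]
    simp [List.length_eq_zero_iff]

lemma foldl_max_shift (g : Nat → Int) (b : Int) :
    ∀ (l : List Nat) (a : Int),
      l.foldl (fun mx i => max mx (b + g i)) (b + a) = b + l.foldl (fun a' i => max a' (g i)) a := by
  intro l
  induction l with
  | nil => intro a; rfl
  | cons i l ih =>
    intro a
    have hmax : max (b + a) (b + g i) = b + max a (g i) := by
      rcases le_total a (g i) with h | h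
      · rw [max_eq_right h, max_eq_right (by omega)]
      · rw [max_eq_left h, max_eq_left (by omega)]
    simp only [List.foldl_cons, hmax, ih]

lemma foldl_max_shift0 (g : Nat → Int) (b : Int) (l : List Nat) :
    l.foldl (fun mx i => max mx (b + g i)) b = b + l.foldl (fun a' i => max a' (g i)) 0 := by
  have := foldl_max_shift g b l 0
  rwa [add_zero] at this

lemma sccRaw_eq (p x y r : List Int) :
    ((List.range y.length).foldl (fun (sc : List Int) i =>
        (List.range p.length).foldl (fun (sc : List Int) j =>
          if (y.getD i 0 - r.getD i 0 ≤ x.getD j 0 ∧ x.getD j 0 ≤ y.getD i 0 + r.getD i 0) ∧ (tcF p x y r).getD j 0 = 1 then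
            sc.set i (sc.getD i 0 + p.getD j 0)
          else sc) sc)
      (List.replicate y.length 0)) = sccF p x y r := rfl

lemma A_eq (p x y r : List Int) :
    maximumPeople p x y r =
      baseV p x y r + (List.range y.length).foldl (fun a i => max a (sccV p x y r i)) 0 := by
  simp only [maximumPeople, st2_eq, sunny_eq, sccRaw_eq]
  rw [PySem.List.foldl_congr_mem _ _ (fun mx i => max mx (baseV p x y r + sccV p x y r i)) _ ?_]
  · exact foldl_max_shift0 (fun i => sccV p x y r i) (baseV p x y r) (List.range y.length)
  · intro acc i hi
    rw [sccF_getD p x y r i (List.mem_range.1 hi)]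

lemma zip_eq_map (u v : List Int) (h : u.length ≤ v.length) :
    u.zip v = (List.range u.length).map (fun j => (u.getD j 0, v.getD j 0)) := by
  apply List.ext_getElem
  · simp [List.length_zip]; omega
  · intro j h1 h2
    have hju : j < u.length := by simpa using h2
    have hjv : j < v.length := by omega
    simp [List.getElem_zip, List.getD_eq_getElem?_getD, hju, hjv]

lemma enum_eq {α : Type} (d : α) :
    ∀ (l : List α) (s : Int), PySem.List.enumerate l s
      = (List.range l.length).map (fun (k : Nat) => (s + (k : Int), l.getD k d)) := by
  intro l
  induction l with
  | nil => intro s; simp [PySem.List.enumerate]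
  | cons a l ih =>
    intro s
    rw [show PySem.List.enumerate (a :: l) s = (s, a) :: PySem.List.enumerate l (s + 1) from rfl]
    rw [ih (s + 1)]
    simp only [List.length_cons, List.range_succ_eq_map, List.map_cons, List.map_map]
    congr 1
    · simp
    · apply List.map_congr_left
      intro k _
      simp only [Function.comp_apply, List.getD_cons_succ]
      congr 1
      push_cast
      ring

-- ===================== B (sweep line) side =====================

-- clouds whose (doubled, half-open-shifted) interval strictly contains sweep key k
def covK (y r : List Int) (k : Int) : List Nat :=
  (List.range y.length).filter (fun i => decide (0 ≤ r.getD i 0 ∧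
    2 * (y.getD i 0 - r.getD i 0) - 1 < k ∧ k < 2 * (y.getD i 0 + r.getD i 0) + 1))

lemma covK_two_mul (x y r : List Int) (j : Nat) :
    covK y r (2 * x.getD j 0) = KK x y r j := by
  unfold covK KK
  apply List.filter_congr
  intro i _
  simp only [decide_eq_decide, covAt]
  omega

def evStart (y r : List Int) (i : Nat) : Int × Int × Int :=
  (2 * (y.getD i 0 - r.getD i 0) - 1, 0, (i : Int))
def evEnd (y r : List Int) (i : Nat) : Int × Int × Int :=
  (2 * (y.getD i 0 + r.getD i 0) + 1, 2, (i : Int))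
def evCloud (y r : List Int) : List (Int × Int × Int) :=
  (List.range y.length).flatMap (fun i => if 0 ≤ r.getD i 0 then [evStart y r i, evEnd y r i] else [])
def evTown (p x : List Int) : List (Int × Int × Int) :=
  (List.range p.length).map (fun j => (2 * x.getD j 0, (1 : Int), p.getD j 0))
def evC (p x y r : List Int) : List (Int × Int × Int) := evCloud y r ++ evTown p x

lemma mem_evCloud_elim {y r : List Int} {a : Int × Int × Int} (h : a ∈ evCloud y r) :
    ∃ i, i < y.length ∧ 0 ≤ r.getD i 0 ∧ (a = evStart y r i ∨ a = evEnd y r i) := by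
  rcases List.mem_flatMap.1 h with ⟨i, hi, ha⟩
  refine ⟨i, List.mem_range.1 hi, ?_⟩
  by_cases hri : 0 ≤ r.getD i 0
  · rw [if_pos hri] at ha
    simp only [List.mem_cons] at ha
    rcases ha with h1 | h1
    · exact ⟨hri, Or.inl h1⟩
    · exact ⟨hri, Or.inr (by simpa using h1)⟩
  · rw [if_neg hri] at ha
    exact absurd ha (List.not_mem_nil)

lemma mem_evTown_elim {p x : List Int} {a : Int × Int × Int} (h : a ∈ evTown p x) :
    ∃ j, j < p.length ∧ a = (2 * x.getD j 0, (1 : Int), p.getD j 0) := by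
  rcases List.mem_map.1 h with ⟨j, hj, ha⟩
  exact ⟨j, List.mem_range.1 hj, ha.symm⟩

-- cloud events carry odd keys, town events even keys
lemma evC_cloud_key {p x y r : List Int} {a : Int × Int × Int} (h : a ∈ evC p x y r)
    (ht : a.2.1 = 0 ∨ a.2.1 = 2) : ¬ (2 ∣ a.1) := by
  rcases List.mem_append.1 h with hc | htown
  · rcases mem_evCloud_elim hc with ⟨i, _, _, hse⟩
    rcases hse with rfl | rfl <;> simp only [evStart, evEnd] <;> omega
  · rcases mem_evTown_elim htown with ⟨j, _, rfl⟩
    simp at ht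

lemma evC_town_key {p x y r : List Int} {a : Int × Int × Int} (h : a ∈ evC p x y r)
    (h0 : ¬ a.2.1 = 0) (h2 : ¬ a.2.1 = 2) : 2 ∣ a.1 := by
  rcases List.mem_append.1 h with hc | htown
  · rcases mem_evCloud_elim hc with ⟨i, _, _, hse⟩
    rcases hse with rfl | rfl
    · exact absurd rfl h0
    · exact absurd rfl h2
  · rcases mem_evTown_elim htown with ⟨j, _, rfl⟩
    exact ⟨x.getD j 0, rfl⟩

-- generic: a flatMap over if-singleton lists is a filtered map
lemma flatMap_ite_pair {α β : Type} (l : List α) (P : α → Prop) [DecidablePred P] (h1 h2 : α → β) :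
    l.flatMap (fun a => if P a then [h1 a, h2 a] else []) =
      (l.filter (fun a => decide (P a))).flatMap (fun a => [h1 a, h2 a]) := by
  induction l with
  | nil => rfl
  | cons a l ih =>
    simp only [List.flatMap_cons, List.filter_cons]
    by_cases hp : P a <;> simp [hp, ih]

-- the port's event-list construction equals evC  (needs the Pre_ length bounds)
lemma events_eq (p x y r : List Int) (hx : p.length ≤ x.length) (hr : y.length ≤ r.length) :
    ((p.zip x).foldl (fun es t => es ++ [(2 * t.2, (1 : Int), t.1)])
      ((PySem.List.enumerate (y.zip r) 0).foldl (fun es e =>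
        if 0 ≤ e.2.2 then
          es ++ [(2 * (e.2.1 - e.2.2) - 1, (0 : Int), e.1), (2 * (e.2.1 + e.2.2) + 1, (2 : Int), e.1)]
        else es) []))
    = evC p x y r := by
  have h1 : (PySem.List.enumerate (y.zip r) 0).foldl (fun es e =>
      if 0 ≤ e.2.2 then
        es ++ [(2 * (e.2.1 - e.2.2) - 1, (0 : Int), e.1), (2 * (e.2.1 + e.2.2) + 1, (2 : Int), e.1)]
      else es) [] = evCloud y r := by
    rw [PySem.List.foldl_congr_mem _ _ (fun es (e : Int × Int × Int) =>
        es ++ (if 0 ≤ e.2.2 then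
          [(2 * (e.2.1 - e.2.2) - 1, (0 : Int), e.1), (2 * (e.2.1 + e.2.2) + 1, (2 : Int), e.1)]
        else [])) _ (by intro acc e _; by_cases h : 0 ≤ e.2.2 <;> simp [h])]
    rw [PySem.List.foldl_append_eq_flatMap, List.nil_append]
    rw [enum_eq ((0 : Int), (0 : Int)), List.flatMap_map]
    have hlen : (y.zip r).length = y.length := by
      rw [List.length_zip]; omega
    rw [hlen]
    apply List.flatMap_congr
    intro k hk
    have hk' : k < y.length := List.mem_range.1 hk
    rw [zip_eq_map y r hr, PySem.List.getD_map_range _ _ _ _ hk']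
    simp only [evStart, evEnd, zero_add]
  rw [h1, PySem.List.foldl_append_singleton_eq_map, zip_eq_map p x hx, List.map_map]
  rfl

-- the sweep step (exactly the port's loop body)
def stepS (st : Int × Int × Int × PySem.Dict Int Int) (e : Int × Int × Int) :
    Int × Int × Int × PySem.Dict Int Int :=
  if e.2.1 = 0 then (st.1 + 1, st.2.1 + e.2.2, st.2.2)
  else if e.2.1 = 2 then (st.1 - 1, st.2.1 - e.2.2, st.2.2)
  else if st.1 = 0 then (st.1, st.2.1, st.2.2.1 + e.2.2, st.2.2.2)
  else if st.1 = 1 then (st.1, st.2.1, st.2.2.1, st.2.2.2.insert st.2.1 (st.2.2.2.getD st.2.1 0 + e.2.2))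
  else st

-- running counters the sweep maintains over a processed prefix
def cnt01 (l : List (Int × Int × Int)) (t : Int) : Int :=
  ((l.filter (fun a => decide (a.2.1 = t))).map (fun _ => (1 : Int))).sum
def pay (l : List (Int × Int × Int)) (t : Int) : Int :=
  ((l.filter (fun a => decide (a.2.1 = t))).map (fun a => a.2.2)).sum

-- generic: a flatMap over if-singleton lists is a filtered map
lemma flatMap_ite_single {α β : Type} (l : List α) (P : α → Prop) [DecidablePred P] (h : α → β) :
    l.flatMap (fun a => if P a then [h a] else []) = (l.filter (fun a => decide (P a))).map h := by
  induction l with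
  | nil => rfl
  | cons a l ih =>
    simp only [List.flatMap_cons, List.filter_cons]
    by_cases hp : P a <;> simp [hp, ih]

lemma ones_sum {α : Type} (l : List α) : (l.map (fun _ => (1 : Int))).sum = (l.length : Int) := by
  induction l with
  | nil => simp
  | cons a l ih => simp; omega

lemma cnt01_append (l1 l2 : List (Int × Int × Int)) (t : Int) :
    cnt01 (l1 ++ l2) t = cnt01 l1 t + cnt01 l2 t := by
  simp [cnt01, List.filter_append]

lemma pay_append (l1 l2 : List (Int × Int × Int)) (t : Int) :
    pay (l1 ++ l2) t = pay l1 t + pay l2 t := by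
  simp [pay, List.filter_append]

-- the tag-0 (interval-start) events strictly below sweep key K, summed through f
lemma wsum0_evC (p x y r : List Int) (f : Int × Int × Int → Int) (K : Int) :
    (((evC p x y r).filter (fun a => decide (a.2.1 = 0 ∧ a.1 < K))).map f).sum
      = (((List.range y.length).filter (fun i => decide (0 ≤ r.getD i 0 ∧ 2 * (y.getD i 0 - r.getD i 0) - 1 < K))).map
          (fun i => f (evStart y r i))).sum := by
  unfold evC
  rw [List.filter_append, List.map_append, List.sum_append]
  have htown : (evTown p x).filter (fun a => decide (a.2.1 = 0 ∧ a.1 < K)) = [] := by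
    rw [List.filter_eq_nil_iff]
    intro b hb
    rcases mem_evTown_elim hb with ⟨j, _, rfl⟩
    simp
  rw [htown]
  unfold evCloud
  rw [flatMap_ite_pair, List.filter_flatMap]
  have hinner : ∀ i ∈ (List.range y.length).filter (fun i => decide (0 ≤ r.getD i 0)),
      [evStart y r i, evEnd y r i].filter (fun a => decide (a.2.1 = 0 ∧ a.1 < K))
        = if 2 * (y.getD i 0 - r.getD i 0) - 1 < K then [evStart y r i] else [] := by
    intro i _
    rw [List.filter_cons, List.filter_cons, List.filter_nil]
    by_cases h : 2 * (y.getD i 0 - r.getD i 0) - 1 < K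
    · rw [if_pos h, if_pos (by simp only [evStart, decide_eq_true_eq]; exact ⟨trivial, h⟩),
        if_neg (by simp only [evEnd, decide_eq_true_eq]; rintro ⟨hh, -⟩; omega)]
    · rw [if_neg h, if_neg (by simp only [evStart, decide_eq_true_eq]; rintro ⟨-, hh⟩; exact h hh),
        if_neg (by simp only [evEnd, decide_eq_true_eq]; rintro ⟨hh, -⟩; omega)]
  rw [List.flatMap_congr hinner, flatMap_ite_single, List.filter_filter]
  rw [List.map_nil, List.sum_nil, add_zero, List.map_map]
  congr 1
  apply congrArg
  apply List.filter_congr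
  intro i _
  simp [Bool.and_comm]

-- the tag-2 (interval-end) events strictly below sweep key K, summed through f
lemma wsum2_evC (p x y r : List Int) (f : Int × Int × Int → Int) (K : Int) :
    (((evC p x y r).filter (fun a => decide (a.2.1 = 2 ∧ a.1 < K))).map f).sum
      = (((List.range y.length).filter (fun i => decide (0 ≤ r.getD i 0 ∧ 2 * (y.getD i 0 + r.getD i 0) + 1 < K))).map
          (fun i => f (evEnd y r i))).sum := by
  unfold evC
  rw [List.filter_append, List.map_append, List.sum_append]
  have htown : (evTown p x).filter (fun a => decide (a.2.1 = 2 ∧ a.1 < K)) = [] := by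
    rw [List.filter_eq_nil_iff]
    intro b hb
    rcases mem_evTown_elim hb with ⟨j, _, rfl⟩
    simp
  rw [htown]
  unfold evCloud
  rw [flatMap_ite_pair, List.filter_flatMap]
  have hinner : ∀ i ∈ (List.range y.length).filter (fun i => decide (0 ≤ r.getD i 0)),
      [evStart y r i, evEnd y r i].filter (fun a => decide (a.2.1 = 2 ∧ a.1 < K))
        = if 2 * (y.getD i 0 + r.getD i 0) + 1 < K then [evEnd y r i] else [] := by
    intro i _
    rw [List.filter_cons, List.filter_cons, List.filter_nil]
    by_cases h : 2 * (y.getD i 0 + r.getD i 0) + 1 < K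
    · rw [if_pos h, if_neg (by simp only [evStart, decide_eq_true_eq]; rintro ⟨hh, -⟩; omega),
        if_pos (by simp only [evEnd, decide_eq_true_eq]; exact ⟨trivial, h⟩)]
    · rw [if_neg h, if_neg (by simp only [evStart, decide_eq_true_eq]; rintro ⟨hh, -⟩; omega),
        if_neg (by simp only [evEnd, decide_eq_true_eq]; rintro ⟨-, hh⟩; exact h hh)]
  rw [List.flatMap_congr hinner, flatMap_ite_single, List.filter_filter]
  rw [List.map_nil, List.sum_nil, add_zero, List.map_map]
  congr 1
  apply congrArg
  apply List.filter_congr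
  intro i _
  simp [Bool.and_comm]

-- difference of two filtered range-sums collapses to the interval-membership filter
lemma range_diff_sum (P1 P2 C : Nat → Bool) (f : Nat → Int) :
    ∀ (n : Nat), (∀ i, i < n → ((P1 i = true ↔ (C i = true ∨ P2 i = true)) ∧ ¬(C i = true ∧ P2 i = true))) →
      (((List.range n).filter P1).map f).sum - (((List.range n).filter P2).map f).sum
        = (((List.range n).filter C).map f).sum := by
  intro n
  induction n with
  | zero => intro _; simp
  | succ n ih =>
    intro h
    rw [List.range_succ]
    simp only [List.filter_append, List.map_append, List.sum_append]
    have hn := h n (by omega)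
    have ih' := ih (fun i hi => h i (by omega))
    cases hP1 : P1 n <;> cases hP2 : P2 n <;> cases hC : C n <;>
      simp [hP1, hP2, hC] at hn ⊢ <;> omega

-- the prefix before any town event of the sorted list sums exactly the cloud events below its key
lemma pre_sum_eq (p x y r : List Int) (f : Int × Int × Int → Int)
    (pre : List (Int × Int × Int)) (e : Int × Int × Int) (suf : List (Int × Int × Int))
    (hsplit : PySem.List.sorted (evC p x y r) (fun a => a.1) false = pre ++ e :: suf)
    (h0 : ¬ e.2.1 = 0) (h2 : ¬ e.2.1 = 2) (t : Int) (ht : t = 0 ∨ t = 2) :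
    ((pre.filter (fun a => decide (a.2.1 = t))).map f).sum
      = (((evC p x y r).filter (fun a => decide (a.2.1 = t ∧ a.1 < e.1))).map f).sum := by
  have hperm := PySem.List.sorted_perm (evC p x y r) (fun a => a.1) false
  rw [hsplit] at hperm
  have hpw := PySem.List.sorted_pairwise (evC p x y r) (fun a => a.1)
  rw [hsplit] at hpw
  obtain ⟨hpw1, hpw2, hmid⟩ := List.pairwise_append.1 hpw
  have hpre_le : ∀ a ∈ pre, a.1 ≤ e.1 := fun a ha => hmid a ha e List.mem_cons_self
  have hsuf_ge : ∀ b ∈ suf, e.1 ≤ b.1 := (List.pairwise_cons.1 hpw2).1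
  have hmemE : ∀ a ∈ pre, a ∈ evC p x y r := fun a ha =>
    hperm.subset (List.mem_append.2 (Or.inl ha))
  have heE : e ∈ evC p x y r := hperm.subset (by simp)
  have heEven : 2 ∣ e.1 := evC_town_key heE h0 h2
  have hstep1 : pre.filter (fun a => decide (a.2.1 = t))
      = pre.filter (fun a => decide (a.2.1 = t ∧ a.1 < e.1)) := by
    apply List.filter_congr
    intro a ha
    simp only [decide_eq_decide]
    constructor
    · intro hat
      refine ⟨hat, ?_⟩
      have hodd := evC_cloud_key (hmemE a ha)
        (by rcases ht with rfl | rfl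
            exacts [Or.inl hat, Or.inr hat])
      have := hpre_le a ha
      omega
    · exact fun hh => hh.1
  have hnil : (e :: suf).filter (fun a => decide (a.2.1 = t ∧ a.1 < e.1)) = [] := by
    rw [List.filter_eq_nil_iff]
    intro b hb
    simp only [decide_eq_true_eq, not_and]
    rcases List.mem_cons.1 hb with rfl | hbs
    · intro hbt
      exfalso
      rcases ht with rfl | rfl
      · exact h0 hbt
      · exact h2 hbt
    · intro _
      have := hsuf_ge b hbs
      omega
  have hp2 : ((pre ++ e :: suf).filter (fun a => decide (a.2.1 = t ∧ a.1 < e.1))).Perm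
      ((evC p x y r).filter (fun a => decide (a.2.1 = t ∧ a.1 < e.1))) := hperm.filter _
  rw [hstep1]
  have hsum := (hp2.map f).sum_eq
  rw [← hsum, List.filter_append, hnil, List.append_nil]

-- decomposition invariant: at every town event of the sorted list, the running counters
-- name exactly the clouds covering its position
lemma H_main (p x y r : List Int)
    (pre : List (Int × Int × Int)) (e : Int × Int × Int) (suf : List (Int × Int × Int))
    (hsplit : PySem.List.sorted (evC p x y r) (fun a => a.1) false = pre ++ e :: suf)
    (h0 : ¬ e.2.1 = 0) (h2 : ¬ e.2.1 = 2) :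
    (0 : Int) + cnt01 pre 0 - cnt01 pre 2 = ((covK y r e.1).length : Int)
    ∧ (0 : Int) + pay pre 0 - pay pre 2 = ((covK y r e.1).map (fun (i : Nat) => (i : Int))).sum := by
  have hperm := PySem.List.sorted_perm (evC p x y r) (fun a => a.1) false
  rw [hsplit] at hperm
  have heE : e ∈ evC p x y r := hperm.subset (by simp)
  have heEven : 2 ∣ e.1 := evC_town_key heE h0 h2
  have hcond : ∀ i, i < y.length →
      (((fun i => decide (0 ≤ r.getD i 0 ∧ 2 * (y.getD i 0 - r.getD i 0) - 1 < e.1)) i = true ↔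
        ((fun i => decide (0 ≤ r.getD i 0 ∧
          2 * (y.getD i 0 - r.getD i 0) - 1 < e.1 ∧ e.1 < 2 * (y.getD i 0 + r.getD i 0) + 1)) i = true ∨
         (fun i => decide (0 ≤ r.getD i 0 ∧ 2 * (y.getD i 0 + r.getD i 0) + 1 < e.1)) i = true))
      ∧ ¬(((fun i => decide (0 ≤ r.getD i 0 ∧
          2 * (y.getD i 0 - r.getD i 0) - 1 < e.1 ∧ e.1 < 2 * (y.getD i 0 + r.getD i 0) + 1)) i = true)
          ∧ ((fun i => decide (0 ≤ r.getD i 0 ∧ 2 * (y.getD i 0 + r.getD i 0) + 1 < e.1)) i = true))) := by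
    intro i _
    simp only [decide_eq_true_eq]
    omega
  constructor
  · unfold cnt01
    rw [pre_sum_eq p x y r _ pre e suf hsplit h0 h2 0 (Or.inl rfl),
        pre_sum_eq p x y r _ pre e suf hsplit h0 h2 2 (Or.inr rfl),
        wsum0_evC, wsum2_evC]
    have := range_diff_sum
      (fun i => decide (0 ≤ r.getD i 0 ∧ 2 * (y.getD i 0 - r.getD i 0) - 1 < e.1))
      (fun i => decide (0 ≤ r.getD i 0 ∧ 2 * (y.getD i 0 + r.getD i 0) + 1 < e.1))
      (fun i => decide (0 ≤ r.getD i 0 ∧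
        2 * (y.getD i 0 - r.getD i 0) - 1 < e.1 ∧ e.1 < 2 * (y.getD i 0 + r.getD i 0) + 1))
      (fun _ => (1 : Int)) y.length hcond
    rw [zero_add, this, ones_sum]
    rfl
  · unfold pay
    rw [pre_sum_eq p x y r _ pre e suf hsplit h0 h2 0 (Or.inl rfl),
        pre_sum_eq p x y r _ pre e suf hsplit h0 h2 2 (Or.inr rfl),
        wsum0_evC, wsum2_evC]
    have := range_diff_sum
      (fun i => decide (0 ≤ r.getD i 0 ∧ 2 * (y.getD i 0 - r.getD i 0) - 1 < e.1))
      (fun i => decide (0 ≤ r.getD i 0 ∧ 2 * (y.getD i 0 + r.getD i 0) + 1 < e.1))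
      (fun i => decide (0 ≤ r.getD i 0 ∧
        2 * (y.getD i 0 - r.getD i 0) - 1 < e.1 ∧ e.1 < 2 * (y.getD i 0 + r.getD i 0) + 1))
      (fun i => (i : Int)) y.length hcond
    simp only [evStart, evEnd]
    rw [zero_add, this]
    rfl

-- the sweep loop, characterised against covK
lemma sweep (y r : List Int) :
    ∀ (es : List (Int × Int × Int)) (c s b : Int) (g : PySem.Dict Int Int),
      g.keys.Nodup → (∀ k ∈ g.keys, ∃ i : Nat, i < y.length ∧ k = (i : Int)) →
      (∀ pre e suf, es = pre ++ e :: suf → ¬ e.2.1 = 0 → ¬ e.2.1 = 2 →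
        c + cnt01 pre 0 - cnt01 pre 2 = ((covK y r e.1).length : Int)
        ∧ s + pay pre 0 - pay pre 2 = ((covK y r e.1).map (fun (i : Nat) => (i : Int))).sum) →
      (es.foldl stepS (c, s, b, g)).2.2.1
          = b + ((es.filter (fun e => decide (¬ e.2.1 = 0 ∧ ¬ e.2.1 = 2 ∧ covK y r e.1 = []))).map (fun e => e.2.2)).sum
        ∧ (es.foldl stepS (c, s, b, g)).2.2.2.keys.Nodup
        ∧ (∀ k ∈ (es.foldl stepS (c, s, b, g)).2.2.2.keys, ∃ i : Nat, i < y.length ∧ k = (i : Int))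
        ∧ ∀ i : Nat, (es.foldl stepS (c, s, b, g)).2.2.2.getD (i : Int) 0
            = g.getD (i : Int) 0 + ((es.filter (fun e => decide (¬ e.2.1 = 0 ∧ ¬ e.2.1 = 2 ∧ covK y r e.1 = [i]))).map (fun e => e.2.2)).sum := by
  intro es
  induction es with
  | nil => intro c s b g hnd hsh _; exact ⟨by simp, hnd, hsh, fun i => by simp⟩
  | cons a es ih =>
    intro c s b g hnd hsh H
    have Htail : ∀ (c' s' : Int),
        c' - c = cnt01 [a] 0 - cnt01 [a] 2 →
        s' - s = pay [a] 0 - pay [a] 2 →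
        (∀ pre e suf, es = pre ++ e :: suf → ¬ e.2.1 = 0 → ¬ e.2.1 = 2 →
          c' + cnt01 pre 0 - cnt01 pre 2 = ((covK y r e.1).length : Int)
          ∧ s' + pay pre 0 - pay pre 2 = ((covK y r e.1).map (fun (i : Nat) => (i : Int))).sum) := by
      intro c' s' hc' hs' pre e suf hdec h0 h2
      have hH := H (a :: pre) e suf (by rw [hdec]; rfl) h0 h2
      rw [show a :: pre = [a] ++ pre from rfl, cnt01_append, cnt01_append,
        pay_append, pay_append] at hH
      exact ⟨by have := hH.1; omega, by have := hH.2; omega⟩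
    by_cases ha0 : a.2.1 = 0
    · have hstep : stepS (c, s, b, g) a = (c + 1, s + a.2.2, b, g) := by
        simp [stepS, ha0]
      rw [List.foldl_cons, hstep]
      obtain ⟨h1, h2', h3, h4⟩ := ih (c + 1) (s + a.2.2) b g hnd hsh
        (Htail _ _ (by simp [cnt01, ha0]) (by simp [pay, ha0]))
      refine ⟨?_, h2', h3, ?_⟩
      · rw [h1, List.filter_cons]
        simp [ha0]
      · intro i
        rw [h4 i, List.filter_cons]
        simp [ha0]
    · by_cases ha2 : a.2.1 = 2
      · have hstep : stepS (c, s, b, g) a = (c - 1, s - a.2.2, b, g) := by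
          simp [stepS, ha2]
        rw [List.foldl_cons, hstep]
        obtain ⟨h1, h2', h3, h4⟩ := ih (c - 1) (s - a.2.2) b g hnd hsh
          (Htail _ _ (by simp [cnt01, ha2]) (by simp [pay, ha2]))
        refine ⟨?_, h2', h3, ?_⟩
        · rw [h1, List.filter_cons]
          simp [ha2]
        · intro i
          rw [h4 i, List.filter_cons]
          simp [ha2]
      · -- a is a town event
        have hH0 := H [] a es rfl ha0 ha2
        have hc : c = ((covK y r a.1).length : Int) := by
          have := hH0.1; simp [cnt01] at this; omega
        have hs : s = ((covK y r a.1).map (fun (i : Nat) => (i : Int))).sum := by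
          have := hH0.2; simp [pay] at this; omega
        have Ht := Htail c s (by simp [cnt01, ha0, ha2]) (by simp [pay, ha0, ha2])
        by_cases hc0 : c = 0
        · have hcovnil : covK y r a.1 = [] := by
            rw [← List.length_eq_zero_iff]; omega
          have hstep : stepS (c, s, b, g) a = (c, s, b + a.2.2, g) := by
            simp [stepS, ha0, ha2, hc0]
          rw [List.foldl_cons, hstep]
          obtain ⟨h1, h2', h3, h4⟩ := ih c s (b + a.2.2) g hnd hsh Ht
          refine ⟨?_, h2', h3, ?_⟩
          · rw [h1, List.filter_cons]
            simp [ha0, ha2, hcovnil]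
            ring
          · intro i
            rw [h4 i, List.filter_cons]
            simp [hcovnil]
        · by_cases hc1 : c = 1
          · have hlen1 : (covK y r a.1).length = 1 := by omega
            obtain ⟨i0, hcov⟩ := List.length_eq_one_iff.1 hlen1
            have hi0 : i0 < y.length := by
              have : i0 ∈ covK y r a.1 := by rw [hcov]; exact List.mem_cons_self
              unfold covK at this
              exact List.mem_range.1 (List.mem_filter.1 this).1
            have hskey : s = (i0 : Int) := by
              rw [hs, hcov]; simp
            have hstep : stepS (c, s, b, g) a
                = (c, s, b, g.insert s (g.getD s 0 + a.2.2)) := by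
              simp [stepS, ha0, ha2, hc1]
            rw [List.foldl_cons, hstep]
            have hsh' : ∀ k ∈ (g.insert s (g.getD s 0 + a.2.2)).keys,
                ∃ i : Nat, i < y.length ∧ k = (i : Int) := by
              intro k hk
              rcases (PySem.Dict.mem_keys_insert _ _ _ _).1 hk with rfl | hold
              · exact ⟨i0, hi0, hskey⟩
              · exact hsh k hold
            obtain ⟨h1, h2', h3, h4⟩ := ih c s b (g.insert s (g.getD s 0 + a.2.2))
              (PySem.Dict.nodup_keys_insert _ _ _ hnd) hsh' Ht
            refine ⟨?_, h2', h3, ?_⟩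
            · rw [h1, List.filter_cons]
              simp [ha0, ha2, hcov]
            · intro i
              rw [h4 i, PySem.Dict.getD_insert, List.filter_cons]
              by_cases hii : i = i0
              · subst hii
                rw [if_pos (by rw [hskey])]
                simp [ha0, ha2, hcov]
                rw [hskey]
                ring
              · have hne : ¬ ((i : Int) = s) := by
                  rw [hskey]
                  intro hh
                  exact hii (by exact_mod_cast hh)
                rw [if_neg hne]
                have : ¬ (covK y r a.1 = [i]) := by
                  rw [hcov]
                  intro hh
                  simp at hh
                  exact hii hh.symm
                simp [this]
          · have hstep : stepS (c, s, b, g) a = (c, s, b, g) := by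
              simp [stepS, ha0, ha2, hc0, hc1]
            rw [List.foldl_cons, hstep]
            obtain ⟨h1, h2', h3, h4⟩ := ih c s b g hnd hsh Ht
            refine ⟨?_, h2', h3, ?_⟩
            · rw [h1, List.filter_cons]
              have : ¬ (covK y r a.1 = []) := by
                intro hh; rw [hh] at hc; simp at hc; omega
              simp [this]
            · intro i
              rw [h4 i, List.filter_cons]
              have : ¬ (covK y r a.1 = [i]) := by
                intro hh; rw [hh] at hc; simp at hc; omega
              simp [this]

-- town-event sums over evC reduce to sums over town indices
lemma townSum (p x y r : List Int) (Pk : Int → Prop) [DecidablePred Pk] :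
    (((evC p x y r).filter (fun e => decide (¬ e.2.1 = 0 ∧ ¬ e.2.1 = 2 ∧ Pk e.1))).map (fun e => e.2.2)).sum
      = (((List.range p.length).filter (fun j => decide (Pk (2 * x.getD j 0)))).map (fun j => p.getD j 0)).sum := by
  unfold evC
  rw [List.filter_append, List.map_append, List.sum_append]
  have hcloud : (evCloud y r).filter (fun e => decide (¬ e.2.1 = 0 ∧ ¬ e.2.1 = 2 ∧ Pk e.1)) = [] := by
    rw [List.filter_eq_nil_iff]
    intro b hb
    rcases mem_evCloud_elim hb with ⟨i, _, _, hse⟩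
    rcases hse with rfl | rfl <;> simp [evStart, evEnd]
  rw [hcloud]
  unfold evTown
  rw [List.filter_map, List.map_map]
  simp only [Function.comp_def]
  rw [List.map_nil, List.sum_nil, zero_add]
  congr 1
  apply congrArg
  apply List.filter_congr
  intro j _
  simp

-- the maximum the final line computes over the gains dictionary
lemma dict_max (m : Nat) (g : Nat → Int) (d : PySem.Dict Int Int)
    (hnd : d.keys.Nodup)
    (hsh : ∀ k ∈ d.keys, ∃ i : Nat, i < m ∧ k = (i : Int))
    (hval : ∀ i : Nat, d.getD (i : Int) 0 = g i) :
    max 0 (PySem.List.maxD d.values (fun v => v) 0)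
      = (List.range m).foldl (fun a i => max a (g i)) 0 := by
  apply le_antisymm
  · apply max_le
    · exact (PySem.List.le_foldl_max_int (List.range m) g 0).1
    · unfold PySem.List.maxD
      cases hmx : PySem.List.max? d.values (fun v => v) with
      | none => simpa using (PySem.List.le_foldl_max_int (List.range m) g 0).1
      | some v =>
        simp only [Option.getD_some]
        have hv : v ∈ d.values := PySem.List.max?_mem hmx
        rcases List.mem_map.1 (show v ∈ d.items.map (fun pr => pr.2) from hv) with ⟨pr, hpr, hpv⟩
        have hk : pr.1 ∈ d.keys := by
          simp only [PySem.Dict.keys]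
          exact List.mem_map.2 ⟨pr, hpr, rfl⟩
        rcases hsh pr.1 hk with ⟨i, him, hki⟩
        have hgd : d.getD pr.1 0 = pr.2 :=
          PySem.Dict.getD_of_mem_items d (by simpa using hpr) hnd 0
        have hvg : v = g i := by
          rw [← hpv, ← hgd, hki, hval i]
        rw [hvg]
        exact (PySem.List.le_foldl_max_int (List.range m) g 0).2 i (List.mem_range.2 him)
  · rw [show (List.range m).foldl (fun a i => max a (g i)) 0
        = ((List.range m).map g).foldl max 0 from (List.foldl_map).symm]
    rcases PySem.List.foldl_max_mem ((List.range m).map g) 0 with h | h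
    · rw [h]; exact le_max_left _ _
    · rcases List.mem_map.1 h with ⟨i, _, hgi⟩
      rw [← hgi]
      by_cases hk : (i : Int) ∈ d.keys
      · rcases List.mem_map.1 (show (i : Int) ∈ d.items.map (fun pr => pr.1) from hk) with ⟨pr, hpr, hpk⟩
        have hgd : d.getD pr.1 0 = pr.2 :=
          PySem.Dict.getD_of_mem_items d (by simpa using hpr) hnd 0
        have hvv : pr.2 ∈ d.values := by
          simp only [PySem.Dict.values]
          exact List.mem_map.2 ⟨pr, hpr, rfl⟩
        cases hmx : PySem.List.max? d.values (fun v => v) with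
        | none =>
          rw [(PySem.List.max?_eq_none_iff _ _).1 hmx] at hvv
          simp at hvv
        | some mv =>
          have hle : pr.2 ≤ mv := PySem.List.max?_isMax hmx _ hvv
          have : g i ≤ mv := by rw [← hval i, ← hpk, hgd]; exact hle
          calc g i ≤ mv := this
            _ ≤ max 0 (PySem.List.maxD d.values (fun v => v) 0) := by
                unfold PySem.List.maxD; rw [hmx]; exact le_max_right _ _
      · have hz : g i = 0 := by
          rw [← hval i]
          apply PySem.Dict.getD_of_not_contains
          cases hcn : d.contains (i : Int)
          · rfl
          · exact absurd ((PySem.Dict.contains_iff_mem_keys d _).1 hcn) hk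
        rw [hz]
        exact le_max_left _ _

-- B's value in the main (length-compatible) case
lemma B_eq (p x y r : List Int) (hx : p.length ≤ x.length) (hr : y.length ≤ r.length) :
    maximumPeople_alt p x y r =
      baseV p x y r + (List.range y.length).foldl (fun a i => max a (sccV p x y r i)) 0 := by
  simp only [maximumPeople_alt]
  rw [events_eq p x y r hx hr]
  have hst : (fun (st : Int × Int × Int × PySem.Dict Int Int) (e : Int × Int × Int) =>
      if e.2.1 = 0 then (st.1 + 1, st.2.1 + e.2.2, st.2.2)
      else if e.2.1 = 2 then (st.1 - 1, st.2.1 - e.2.2, st.2.2)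
      else if st.1 = 0 then (st.1, st.2.1, st.2.2.1 + e.2.2, st.2.2.2)
      else if st.1 = 1 then (st.1, st.2.1, st.2.2.1, st.2.2.2.insert st.2.1 (st.2.2.2.getD st.2.1 0 + e.2.2))
      else st) = stepS := rfl
  rw [hst]
  have hperm := PySem.List.sorted_perm (evC p x y r) (fun a => a.1) false
  obtain ⟨h1, h2, h3, h4⟩ := sweep y r (PySem.List.sorted (evC p x y r) (fun a => a.1) false)
    0 0 0 PySem.Dict.empty (by simp [PySem.Dict.keys_empty]) (by simp [PySem.Dict.keys_empty])
    (fun pre e suf hdec h0 h2 => H_main p x y r pre e suf hdec h0 h2)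
  rw [h1]
  have hsumnil : ((((PySem.List.sorted (evC p x y r) (fun a => a.1) false).filter
      (fun e => decide (¬ e.2.1 = 0 ∧ ¬ e.2.1 = 2 ∧ covK y r e.1 = []))).map (fun e => e.2.2)).sum)
      = baseV p x y r := by
    rw [((hperm.filter _).map _).sum_eq, townSum p x y r (fun k => covK y r k = [])]
    unfold baseV
    congr 1
    apply congrArg
    apply List.filter_congr
    intro j _
    rw [covK_two_mul]
  rw [hsumnil, zero_add]
  congr 1
  rw [dict_max y.length (sccV p x y r) _ h2 h3 ?_]
  intro i
  rw [h4 i, PySem.Dict.getD_empty, zero_add]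
  rw [((hperm.filter _).map _).sum_eq, townSum p x y r (fun k => covK y r k = [i])]
  unfold sccV
  congr 1
  apply congrArg
  apply List.filter_congr
  intro j _
  rw [covK_two_mul]

lemma foldl_max_zero : ∀ (l : List Nat), l.foldl (fun a (_ : Nat) => max a (0 : Int)) 0 = 0 := by
  intro l
  induction l with
  | nil => rfl
  | cons i l ih => simpa using ih

lemma A_nil (x y r : List Int) : maximumPeople [] x y r = 0 := by
  rw [A_eq]
  have hb : baseV [] x y r = 0 := by simp [baseV]
  have hs : ∀ i, sccV [] x y r i = 0 := by intro i; simp [sccV]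
  rw [hb]
  rw [PySem.List.foldl_congr_mem _ _ (fun a (_ : Nat) => max a (0 : Int)) _
    (fun acc i _ => by rw [hs i])]
  rw [foldl_max_zero]
  norm_num

-- with no town events the sweep never touches base or gains
lemma sweep_cloud_only : ∀ (es : List (Int × Int × Int)),
    (∀ a ∈ es, a.2.1 = 0 ∨ a.2.1 = 2) → ∀ (c s b : Int) (g : PySem.Dict Int Int),
      (es.foldl stepS (c, s, b, g)).2.2 = (b, g) := by
  intro es
  induction es with
  | nil => intro _ c s b g; rfl
  | cons a es ih =>
    intro h c s b g
    rcases h a List.mem_cons_self with ha | ha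
    · rw [List.foldl_cons, show stepS (c, s, b, g) a = (c + 1, s + a.2.2, b, g) by simp [stepS, ha]]
      exact ih (fun a' ha' => h a' (List.mem_cons_of_mem _ ha')) _ _ _ _
    · rw [List.foldl_cons, show stepS (c, s, b, g) a = (c - 1, s - a.2.2, b, g) by
        simp [stepS, ha]]
      exact ih (fun a' ha' => h a' (List.mem_cons_of_mem _ ha')) _ _ _ _

lemma B_nil (x y r : List Int) : maximumPeople_alt [] x y r = 0 := by
  simp only [maximumPeople_alt, List.zip_nil_left, List.foldl_nil]
  have hst : (fun (st : Int × Int × Int × PySem.Dict Int Int) (e : Int × Int × Int) =>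
      if e.2.1 = 0 then (st.1 + 1, st.2.1 + e.2.2, st.2.2)
      else if e.2.1 = 2 then (st.1 - 1, st.2.1 - e.2.2, st.2.2)
      else if st.1 = 0 then (st.1, st.2.1, st.2.2.1 + e.2.2, st.2.2.2)
      else if st.1 = 1 then (st.1, st.2.1, st.2.2.1, st.2.2.2.insert st.2.1 (st.2.2.2.getD st.2.1 0 + e.2.2))
      else st) = stepS := rfl
  rw [hst]
  have htags : ∀ a ∈ PySem.List.sorted
      ((PySem.List.enumerate (y.zip r) 0).foldl (fun es e =>
        if 0 ≤ e.2.2 then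
          es ++ [(2 * (e.2.1 - e.2.2) - 1, (0 : Int), e.1), (2 * (e.2.1 + e.2.2) + 1, (2 : Int), e.1)]
        else es) []) (fun e => e.1) false, a.2.1 = 0 ∨ a.2.1 = 2 := by
    intro a ha
    have ha' := (PySem.List.mem_sorted _ _ _ _).1 ha
    rw [PySem.List.foldl_congr_mem _ _ (fun es (e : Int × Int × Int) =>
        es ++ (if 0 ≤ e.2.2 then
          [(2 * (e.2.1 - e.2.2) - 1, (0 : Int), e.1), (2 * (e.2.1 + e.2.2) + 1, (2 : Int), e.1)]
        else [])) _ (by intro acc e _; by_cases h : 0 ≤ e.2.2 <;> simp [h]),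
      PySem.List.foldl_append_eq_flatMap, List.nil_append] at ha'
    rcases List.mem_flatMap.1 ha' with ⟨e, _, hae⟩
    by_cases hc : 0 ≤ e.2.2
    · rw [if_pos hc] at hae
      rcases List.mem_cons.1 hae with rfl | hae'
      · exact Or.inl rfl
      · rcases List.mem_cons.1 hae' with rfl | hae''
        · exact Or.inr rfl
        · exact absurd hae'' (List.not_mem_nil)
    · rw [if_neg hc] at hae
      exact absurd hae (List.not_mem_nil)
  rw [sweep_cloud_only _ htags 0 0 0 PySem.Dict.empty]
  simp [PySem.List.maxD, PySem.List.max?, PySem.Dict.values, PySem.Dict.empty]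

-- ===== VERDICT (by name: the statement is the Claim_ definition above) =====
theorem maximumPeople_spec : Claim_equal_maximumPeople := by
  intro p x y r _ hpre
  unfold Spec_maximumPeople
  rcases hpre with rfl | ⟨hx, hr⟩
  · rw [A_nil, B_nil]
  · rw [A_eq, B_eq p x y r hx hr]
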